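-- pv_equiv track=rewrite | github.com/DanggQuangg/B-o-c-o-cu-i-k-AI-nh-m- | Maze.py | actions_ordered_toward
-- ===== SOURCE A (Python) =====
-- def actions_ordered_toward(s, goal):
--     """Ưu tiên các hướng tiến gần goal trước để giảm nổ nhánh."""
--     gr, gc = goal; r, c = s
--     order = []
--     if gr < r: order.append("UP")
--     if gr > r: order.append("DOWN")
--     if gc < c: order.append("LEFT")
--     if gc > c: order.append("RIGHT")
--     for a in ["UP", "DOWN", "LEFT", "RIGHT"]:
--         if a not in order:
--             order.append(a)
--     return order
-- ===== SOURCE B (Python) =====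
-- _ORDER_TABLE = {
--     (-1, -1): ["UP", "LEFT", "DOWN", "RIGHT"],
--     (-1,  0): ["UP", "DOWN", "LEFT", "RIGHT"],
--     (-1,  1): ["UP", "RIGHT", "DOWN", "LEFT"],
--     ( 0, -1): ["LEFT", "UP", "DOWN", "RIGHT"],
--     ( 0,  0): ["UP", "DOWN", "LEFT", "RIGHT"],
--     ( 0,  1): ["RIGHT", "UP", "DOWN", "LEFT"],
--     ( 1, -1): ["DOWN", "LEFT", "UP", "RIGHT"],
--     ( 1,  0): ["DOWN", "UP", "LEFT", "RIGHT"],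
--     ( 1,  1): ["DOWN", "RIGHT", "UP", "LEFT"],
-- }
--
-- def actions_ordered_toward(s, goal):
--     goal_r, goal_c = goal; r, c = s
--     dr = (goal_r > r) - (goal_r < r)
--     dc = (goal_c > c) - (goal_c < c)
--     return _ORDER_TABLE[(dr, dc)]
-- ===== Notes on version B (the rewrite author's own statement) =====
-- stated objective: alternative
-- what changed: Replaces A's conditional appends plus a membership-checking fill loop with a precomputed 9-entry lookup table indexed by the sign pair (sign(gr-r), sign(gc-c)); no list is built at call time.
import Mathlib
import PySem

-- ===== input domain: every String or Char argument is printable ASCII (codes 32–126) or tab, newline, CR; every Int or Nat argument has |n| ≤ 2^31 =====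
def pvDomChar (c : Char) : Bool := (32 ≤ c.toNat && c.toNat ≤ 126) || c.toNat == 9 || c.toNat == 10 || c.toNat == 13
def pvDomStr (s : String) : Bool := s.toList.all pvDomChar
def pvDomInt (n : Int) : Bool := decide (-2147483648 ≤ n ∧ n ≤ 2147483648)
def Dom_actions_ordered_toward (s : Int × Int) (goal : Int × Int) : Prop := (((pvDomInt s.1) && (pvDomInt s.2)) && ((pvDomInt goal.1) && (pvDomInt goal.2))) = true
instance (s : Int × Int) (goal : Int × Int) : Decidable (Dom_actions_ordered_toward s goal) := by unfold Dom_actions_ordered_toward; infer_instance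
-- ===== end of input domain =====

-- B replaces A's conditional appends + fill loop by a precomputed 9-entry table indexed by the sign pair (alternative; same cost).
-- ===== PORT A =====
def actions_ordered_toward (s : Int × Int) (goal : Int × Int) : List String :=
  let gr := goal.1; let gc := goal.2
  let r := s.1; let c := s.2
  let order : List String := []
  let order := if gr < r then order ++ ["UP"] else order
  let order := if gr > r then order ++ ["DOWN"] else order
  let order := if gc < c then order ++ ["LEFT"] else order
  let order := if gc > c then order ++ ["RIGHT"] else order
  (["UP", "DOWN", "LEFT", "RIGHT"] : List String).foldl
    (fun acc a => if a ∈ acc then acc else acc ++ [a]) order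

-- ===== PORT B =====
-- Source B's module-level table, as a PySem.Dict in the same insertion order.
def pvOrderTable : PySem.Dict (Int × Int) (List String) :=
  ((((((((((PySem.Dict.empty).insert (-1, -1) ["UP", "LEFT", "DOWN", "RIGHT"]).insert
      (-1, 0) ["UP", "DOWN", "LEFT", "RIGHT"]).insert
      (-1, 1) ["UP", "RIGHT", "DOWN", "LEFT"]).insert
      (0, -1) ["LEFT", "UP", "DOWN", "RIGHT"]).insert
      (0, 0) ["UP", "DOWN", "LEFT", "RIGHT"]).insert
      (0, 1) ["RIGHT", "UP", "DOWN", "LEFT"]).insert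
      (1, -1) ["DOWN", "LEFT", "UP", "RIGHT"]).insert
      (1, 0) ["DOWN", "UP", "LEFT", "RIGHT"]).insert
      (1, 1) ["DOWN", "RIGHT", "UP", "LEFT"])

def actions_ordered_toward_alt (s : Int × Int) (goal : Int × Int) : List String :=
  let gr := goal.1; let gc := goal.2
  let r := s.1; let c := s.2
  let dr : Int := (if gr > r then 1 else 0) - (if gr < r then 1 else 0)
  let dc : Int := (if gc > c then 1 else 0) - (if gc < c then 1 else 0)
  -- the key (dr, dc) is always in the table, so Python's [] lookup never raises; default [] is unreachable
  pvOrderTable.getD (dr, dc) []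

-- ===== PRECONDITION & SPEC =====
def Spec_actions_ordered_toward (s : Int × Int) (goal : Int × Int) (out : List String) : Prop := out = actions_ordered_toward_alt s goal
instance (s : Int × Int) (goal : Int × Int) (out : List String) : Decidable (Spec_actions_ordered_toward s goal out) := by unfold Spec_actions_ordered_toward; infer_instance

-- ===== CLAIM =====
def Claim_equal_actions_ordered_toward : Prop := ∀ (s : Int × Int) (goal : Int × Int), Dom_actions_ordered_toward s goal → Spec_actions_ordered_toward s goal (actions_ordered_toward s goal)

-- ===== LEMMAS AND PROOFS =====

-- ===== VERDICT =====
theorem actions_ordered_toward_spec : Claim_equal_actions_ordered_toward := by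
  intro s goal _
  unfold Spec_actions_ordered_toward
  obtain ⟨r, c⟩ := s; obtain ⟨gr, gc⟩ := goal
  rcases lt_trichotomy gr r with h1 | h1 | h1 <;>
    rcases lt_trichotomy gc c with h2 | h2 | h2 <;>
    simp [actions_ordered_toward, actions_ordered_toward_alt, h1, h2, not_lt_of_gt,
      pvOrderTable, PySem.Dict.getD, PySem.Dict.get?, PySem.Dict.insert, PySem.Dict.empty,
      List.foldl]
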